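-- pv_equiv track=rewrite | github.com/danhetrick/quirc | quirc.py | sortNicks
-- ===== SOURCE A (Python) =====
-- def sortNicks(nicklist):
-- 	ops = []
-- 	voiced = []
-- 	normal = []
-- 	sortnicks = []
-- 	for nick in nicklist:
-- 		if nick.isspace(): continue
-- 		if '@' in nick:
-- 			ops.append(nick)
-- 		elif '+' in nick:
-- 			voiced.append(nick)
-- 		else:
-- 			normal.append(nick)
-- 	ops = sorted(ops, key=str.lower)
-- 	voiced = sorted(voiced, key=str.lower)
-- 	normal = sorted(normal, key=str.lower)
-- 	for nick in ops:
-- 		sortnicks.append(nick)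
-- 	for nick in voiced:
-- 		sortnicks.append(nick)
-- 	for nick in normal:
-- 		sortnicks.append(nick)
-- 	return sortnicks
-- ===== SOURCE B (Python) =====
-- def sortNicks(nicklist):
-- 	def prio(nick):
-- 		if '@' in nick: return 0
-- 		if '+' in nick: return 1
-- 		return 2
-- 	return sorted((nick for nick in nicklist if not nick.isspace()),
-- 		key=lambda nick: (prio(nick), nick.lower()))
-- ===== Notes on version B (the rewrite author's own statement) =====
-- stated objective: simpler
-- what changed: Replaced the three-way partition, three separate case-insensitive sorts and three append loops by a single stable sort of the whitespace-filtered list under the composite key (prefix priority, lowercased nick), relying on sort stability for identical tie-breaking.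
import Mathlib
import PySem

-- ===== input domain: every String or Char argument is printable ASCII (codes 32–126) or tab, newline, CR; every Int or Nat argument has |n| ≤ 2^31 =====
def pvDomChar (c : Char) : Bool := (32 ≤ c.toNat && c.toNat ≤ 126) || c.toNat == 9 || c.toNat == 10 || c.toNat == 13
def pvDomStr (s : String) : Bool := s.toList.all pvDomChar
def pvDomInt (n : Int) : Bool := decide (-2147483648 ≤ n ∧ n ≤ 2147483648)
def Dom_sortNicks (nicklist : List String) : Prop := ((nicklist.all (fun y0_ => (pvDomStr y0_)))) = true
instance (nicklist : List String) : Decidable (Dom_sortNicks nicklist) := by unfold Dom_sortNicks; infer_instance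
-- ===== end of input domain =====

-- B replaces A's three-way partition plus three separate sorts and three append loops by one
-- stable sort of the whitespace-filtered list under the composite key (priority, lowercased nick): simpler.

-- ===== PORT A =====
def sortNicks (nicklist : List String) : List String :=
  let st := nicklist.foldl
    (fun (st : List String × List String × List String) nick =>
      let (ops, voiced, normal) := st
      if PySem.Str.strIsspace nick then (ops, voiced, normal)
      else if PySem.Str.isIn "@" nick then (ops ++ [nick], voiced, normal)
      else if PySem.Str.isIn "+" nick then (ops, voiced ++ [nick], normal)
      else (ops, voiced, normal ++ [nick]))
    ([], [], [])
  let ops := PySem.List.sorted st.1 (fun s => PySem.Str.lower s)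
  let voiced := PySem.List.sorted st.2.1 (fun s => PySem.Str.lower s)
  let normal := PySem.List.sorted st.2.2 (fun s => PySem.Str.lower s)
  let sortnicks : List String := []
  let sortnicks := ops.foldl (fun acc nick => acc ++ [nick]) sortnicks
  let sortnicks := voiced.foldl (fun acc nick => acc ++ [nick]) sortnicks
  let sortnicks := normal.foldl (fun acc nick => acc ++ [nick]) sortnicks
  sortnicks

-- ===== PORT B =====
def pvPrio (nick : String) : Int :=
  if PySem.Str.isIn "@" nick then 0
  else if PySem.Str.isIn "+" nick then 1
  else 2

def sortNicks_alt (nicklist : List String) : List String :=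
  PySem.List.sorted2 (nicklist.filter (fun nick => !PySem.Str.strIsspace nick))
    pvPrio (fun nick => PySem.Str.lower nick)

-- ===== PRECONDITION & SPEC =====
def Spec_sortNicks (nicklist : List String) (out : List String) : Prop := out = sortNicks_alt nicklist
instance (nicklist : List String) (out : List String) : Decidable (Spec_sortNicks nicklist out) := by unfold Spec_sortNicks; infer_instance

-- ===== CLAIM (what is proved, stated in full; the proofs are below) =====
def Claim_equal_sortNicks : Prop := ∀ (nicklist : List String), Dom_sortNicks nicklist → Spec_sortNicks nicklist (sortNicks nicklist)

-- ===== LEMMAS AND PROOFS =====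

theorem pv_foldl_push (l : List String) (init : List String) :
    l.foldl (fun acc n => acc ++ [n]) init = init ++ l := by
  induction l generalizing init with
  | nil => simp
  | cons x t ih => simp [List.foldl, ih]

theorem pv_insertBy_agree_append {α : Type} (before before' : α → α → Bool) (x : α)
    (A B : List α) (hA : ∀ y ∈ A, before x y = before' x y)
    (hB : ∀ b ∈ B, before x b = true) :
    PySem.List.insertBy before x (A ++ B) = PySem.List.insertBy before' x A ++ B := by
  induction A with
  | nil =>
    cases B with
    | nil => simp [PySem.List.insertBy]
    | cons b B' => simp [PySem.List.insertBy, hB b (by simp)]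
  | cons y A' ih =>
    have hy := hA y (by simp)
    by_cases h : before x y = true
    · simp [PySem.List.insertBy, h, hy ▸ h]
    · have h' : before' x y = false := by rw [← hy]; simpa using h
      simp [PySem.List.insertBy, h, h', ih (fun z hz => hA z (by simp [hz]))]

theorem pv_insertBy_skip_append {α : Type} (before : α → α → Bool) (x : α)
    (A B : List α) (hA : ∀ y ∈ A, before x y = false) :
    PySem.List.insertBy before x (A ++ B) = A ++ PySem.List.insertBy before x B := by
  induction A with
  | nil => simp
  | cons y A' ih =>
    simp [PySem.List.insertBy, hA y (by simp), ih (fun z hz => hA z (by simp [hz]))]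

theorem pv_sorted_snoc (l : List String) (x : String) (key : String → String) :
    PySem.List.sorted (l ++ [x]) key =
      PySem.List.insertBy (fun a b => decide (key a < key b)) x (PySem.List.sorted l key) := by
  rw [PySem.List.sorted_eq_foldl_insertBy, PySem.List.sorted_eq_foldl_insertBy, List.foldl_append]
  rfl

theorem pv_prio_cases (x : String) : pvPrio x = 0 ∨ pvPrio x = 1 ∨ pvPrio x = 2 := by
  unfold pvPrio; split_ifs <;> simp

theorem pv_mem_group (k : Int) (ys : List String) (y : String)
    (h : y ∈ PySem.List.sorted (ys.filter (fun n => pvPrio n == k)) (fun s => PySem.Str.lower s)) :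
    pvPrio y = k := by
  rw [PySem.List.mem_sorted] at h
  simpa using (List.mem_filter.mp h).2

def pvLex (a b : String) : Bool :=
  decide (pvPrio a < pvPrio b) ||
    (!decide (pvPrio b < pvPrio a) && decide (PySem.Str.lower a < PySem.Str.lower b))

theorem pv_main (xs : List String) :
    List.foldl (fun acc x => PySem.List.insertBy pvLex x acc) [] xs =
      PySem.List.sorted (xs.filter (fun n => pvPrio n == 0)) (fun s => PySem.Str.lower s) ++
      (PySem.List.sorted (xs.filter (fun n => pvPrio n == 1)) (fun s => PySem.Str.lower s) ++
       PySem.List.sorted (xs.filter (fun n => pvPrio n == 2)) (fun s => PySem.Str.lower s)) := by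
  induction xs using List.reverseRecOn with
  | nil => rfl
  | append_singleton ys x ih =>
    rw [List.foldl_append, List.foldl_cons, List.foldl_nil, ih]
    rcases pv_prio_cases x with hp | hp | hp
    · rw [pv_insertBy_agree_append pvLex (fun a b => decide (PySem.Str.lower a < PySem.Str.lower b)) x _ _
        (fun y hy => by
          have h0 := pv_mem_group 0 ys y hy
          simp [pvLex, hp, h0])
        (fun b hb => by
          rcases List.mem_append.mp hb with h | h
          · have h1 := pv_mem_group 1 ys b h
            simp [pvLex, hp, h1]
          · have h2 := pv_mem_group 2 ys b h
            simp [pvLex, hp, h2])]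
      simp [List.filter_append, hp, pv_sorted_snoc]
    · rw [pv_insertBy_skip_append pvLex x _ _
        (fun y hy => by
          have h0 := pv_mem_group 0 ys y hy
          simp [pvLex, hp, h0]),
        pv_insertBy_agree_append pvLex (fun a b => decide (PySem.Str.lower a < PySem.Str.lower b)) x _ _
        (fun y hy => by
          have h1 := pv_mem_group 1 ys y hy
          simp [pvLex, hp, h1])
        (fun b hb => by
          have h2 := pv_mem_group 2 ys b hb
          simp [pvLex, hp, h2])]
      simp [List.filter_append, hp, pv_sorted_snoc]
    · rw [← List.append_assoc,
        pv_insertBy_skip_append pvLex x _ _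
        (fun y hy => by
          rcases List.mem_append.mp hy with h | h
          · have h0 := pv_mem_group 0 ys y h
            simp [pvLex, hp, h0]
          · have h1 := pv_mem_group 1 ys y h
            simp [pvLex, hp, h1])]
      have hlast := pv_insertBy_agree_append pvLex (fun a b => decide (PySem.Str.lower a < PySem.Str.lower b)) x
        (PySem.List.sorted (ys.filter (fun n => pvPrio n == 2)) (fun s => PySem.Str.lower s)) []
        (fun y hy => by
          have h2 := pv_mem_group 2 ys y hy
          simp [pvLex, hp, h2])
        (fun b hb => by simp at hb)
      rw [List.append_nil] at hlast
      rw [hlast]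
      simp [List.filter_append, hp, pv_sorted_snoc, List.append_assoc]

def pvStep (st : List String × List String × List String) (nick : String) :
    List String × List String × List String :=
  if PySem.Str.strIsspace nick then (st.1, st.2.1, st.2.2)
  else if PySem.Str.isIn "@" nick then (st.1 ++ [nick], st.2.1, st.2.2)
  else if PySem.Str.isIn "+" nick then (st.1, st.2.1 ++ [nick], st.2.2)
  else (st.1, st.2.1, st.2.2 ++ [nick])

theorem pv_loop (xs : List String) (o v m : List String) :
    xs.foldl
      (fun (st : List String × List String × List String) nick =>
        let (ops, voiced, normal) := st
        if PySem.Str.strIsspace nick then (ops, voiced, normal)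
        else if PySem.Str.isIn "@" nick then (ops ++ [nick], voiced, normal)
        else if PySem.Str.isIn "+" nick then (ops, voiced ++ [nick], normal)
        else (ops, voiced, normal ++ [nick]))
      (o, v, m) =
    (o ++ xs.filter (fun n => !PySem.Str.strIsspace n && PySem.Str.isIn "@" n),
     v ++ xs.filter (fun n => !PySem.Str.strIsspace n && (!PySem.Str.isIn "@" n && PySem.Str.isIn "+" n)),
     m ++ xs.filter (fun n => !PySem.Str.strIsspace n && (!PySem.Str.isIn "@" n && !PySem.Str.isIn "+" n))) := by
  show xs.foldl pvStep (o, v, m) = _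
  induction xs generalizing o v m with
  | nil => simp
  | cons x t ih =>
    rw [List.foldl_cons, List.filter_cons, List.filter_cons, List.filter_cons]
    cases hs : PySem.Str.strIsspace x with
    | true =>
      have hstep : pvStep (o, v, m) x = (o, v, m) := by unfold pvStep; rw [hs]; rfl
      rw [hstep, ih]; simp
    | false =>
      cases ha : PySem.Str.isIn "@" x with
      | true =>
        have hstep : pvStep (o, v, m) x = (o ++ [x], v, m) := by unfold pvStep; rw [hs, ha]; rfl
        rw [hstep, ih]; simp
      | false =>
        cases hv : PySem.Str.isIn "+" x with
        | true =>
          have hstep : pvStep (o, v, m) x = (o, v ++ [x], m) := by unfold pvStep; rw [hs, ha, hv]; rfl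
          rw [hstep, ih]; simp
        | false =>
          have hstep : pvStep (o, v, m) x = (o, v, m ++ [x]) := by unfold pvStep; rw [hs, ha, hv]; rfl
          rw [hstep, ih]; simp

theorem pv_group_filter (xs : List String) (k : Int) (p : String → Bool)
    (hpk : ∀ n, (pvPrio n == k) = p n) :
    (xs.filter (fun n => !PySem.Str.strIsspace n)).filter (fun n => pvPrio n == k) =
      xs.filter (fun n => !PySem.Str.strIsspace n && p n) := by
  rw [List.filter_filter]
  exact List.filter_congr (fun n _ => by rw [hpk, Bool.and_comm])

-- ===== VERDICT (by name: the statement is the Claim_ definition above) =====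
theorem sortNicks_spec : Claim_equal_sortNicks := by
  intro nicklist _
  unfold Spec_sortNicks
  show sortNicks nicklist = sortNicks_alt nicklist
  unfold sortNicks sortNicks_alt
  rw [pv_loop]
  simp only [List.nil_append]
  rw [pv_foldl_push, pv_foldl_push, pv_foldl_push, List.nil_append, List.append_assoc]
  have hB : PySem.List.sorted2 (nicklist.filter (fun nick => !PySem.Str.strIsspace nick))
      pvPrio (fun nick => PySem.Str.lower nick) =
      List.foldl (fun acc x => PySem.List.insertBy pvLex x acc) []
        (nicklist.filter (fun nick => !PySem.Str.strIsspace nick)) := rfl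
  rw [hB, pv_main]
  rw [pv_group_filter _ 0 (fun n => PySem.Str.isIn "@" n)
      (fun n => by unfold pvPrio; split_ifs <;> simp_all),
    pv_group_filter _ 1 (fun n => !PySem.Str.isIn "@" n && PySem.Str.isIn "+" n)
      (fun n => by unfold pvPrio; split_ifs <;> simp_all),
    pv_group_filter _ 2 (fun n => !PySem.Str.isIn "@" n && !PySem.Str.isIn "+" n)
      (fun n => by unfold pvPrio; split_ifs <;> simp_all)]
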